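-- pv_equiv track=rewrite | github.com/ParkJaechang/Coil-Analyzing | src/field_analysis/lut.py | prioritize_lut_target_metrics
-- ===== SOURCE A (Python) =====
-- CURRENT_DEBUG_TARGET_METRICS = {"achieved_current_pp_a_mean"}
--
-- def prioritize_lut_target_metrics(
--     metric_options: list[str],
--     main_field_axis: str,
--     include_current_debug: bool = False,
-- ) -> list[str]:
--     preferred_order = [
--         f"achieved_{main_field_axis}_pp_mean",
--         "achieved_bz_mT_pp_mean",
--         "achieved_bmag_mT_pp_mean",
--         "achieved_bproj_mT_pp_mean",
--     ]
--     ordered = [metric for metric in dict.fromkeys(preferred_order) if metric in metric_options]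
--     ordered.extend(
--         metric
--         for metric in metric_options
--         if metric not in ordered and metric not in CURRENT_DEBUG_TARGET_METRICS
--     )
--     if include_current_debug or not ordered:
--         ordered.extend(
--             metric
--             for metric in metric_options
--             if metric in CURRENT_DEBUG_TARGET_METRICS and metric not in ordered
--         )
--     return ordered
-- ===== SOURCE B (Python) =====
-- CURRENT_DEBUG_TARGET_METRICS = {"achieved_current_pp_a_mean"}
--
-- def prioritize_lut_target_metrics(
--     metric_options: list[str],
--     main_field_axis: str,
--     include_current_debug: bool = False,
-- ) -> list[str]:
--     # Build an index table for the preferred metrics once, then classify the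
--     # options in a single pass (a seen-set for dedup, bucket slots for the
--     # preferred group, plain lists for the rest), instead of re-scanning the
--     # growing result list for every option.
--     priority = {}
--     for m in (
--         f"achieved_{main_field_axis}_pp_mean",
--         "achieved_bz_mT_pp_mean",
--         "achieved_bmag_mT_pp_mean",
--         "achieved_bproj_mT_pp_mean",
--     ):
--         priority.setdefault(m, len(priority))
--     slots = [None] * len(priority)
--     others = []
--     debug = []
--     seen = set()
--     for m in metric_options:
--         if m in seen:
--             continue
--         seen.add(m)
--         if m in priority:
--             slots[priority[m]] = m
--         elif m in CURRENT_DEBUG_TARGET_METRICS: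
--             debug.append(m)
--         else:
--             others.append(m)
--     ordered = [m for m in slots if m is not None] + others
--     if include_current_debug or not ordered:
--         ordered += debug
--     return ordered
-- ===== Notes on version B (the rewrite author's own statement) =====
-- stated objective: faster
-- what changed: Replaces A's repeated 'not in ordered' scans over the growing result with one classification pass over the options using a seen-set, fixed priority slots for the preferred metrics, and separate other/debug buckets concatenated at the end.
import Mathlib
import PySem

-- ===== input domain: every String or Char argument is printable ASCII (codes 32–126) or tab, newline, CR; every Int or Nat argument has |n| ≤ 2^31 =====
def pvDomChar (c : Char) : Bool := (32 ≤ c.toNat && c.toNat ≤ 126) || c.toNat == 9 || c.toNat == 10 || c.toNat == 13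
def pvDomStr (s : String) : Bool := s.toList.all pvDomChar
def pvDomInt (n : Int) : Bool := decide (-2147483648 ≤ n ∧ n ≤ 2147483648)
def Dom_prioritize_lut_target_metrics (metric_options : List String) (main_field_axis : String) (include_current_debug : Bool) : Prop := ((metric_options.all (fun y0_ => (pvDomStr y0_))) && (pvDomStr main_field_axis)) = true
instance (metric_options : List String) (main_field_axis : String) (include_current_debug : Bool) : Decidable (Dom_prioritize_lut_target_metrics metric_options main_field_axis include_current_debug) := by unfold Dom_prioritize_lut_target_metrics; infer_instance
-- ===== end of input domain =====

-- B replaces A's repeated membership scans of the growing result list with one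
-- classification pass (seen-set dedup, priority index table + slots, separate
-- other/debug buckets); equal return value on every input.

-- CURRENT_DEBUG_TARGET_METRICS = {"achieved_current_pp_a_mean"}  (module constant, used by both)
def pvDebugSet : PySem.Set String := PySem.Set.ofList ["achieved_current_pp_a_mean"]

-- ===== PORT A =====
def prioritize_lut_target_metrics (metric_options : List String) (main_field_axis : String) (include_current_debug : Bool) : List String :=
  let preferred_order : List String :=
    ["achieved_" ++ main_field_axis ++ "_pp_mean",
     "achieved_bz_mT_pp_mean", "achieved_bmag_mT_pp_mean", "achieved_bproj_mT_pp_mean"]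
  let ordered := (PySem.List.dedup preferred_order).filter (fun m => decide (m ∈ metric_options))
  let ordered := metric_options.foldl
    (fun acc m => if m ∉ acc ∧ m ∉ pvDebugSet then acc ++ [m] else acc) ordered
  if include_current_debug || ordered.isEmpty then
    metric_options.foldl
      (fun acc m => if m ∈ pvDebugSet ∧ m ∉ acc then acc ++ [m] else acc) ordered
  else ordered

-- ===== PORT B =====
-- the classification loop of B: one pass over the options with a seen-set,
-- the preferred-bucket slots and the two tail buckets as loop state
def pvBClassify (priority : PySem.Dict String Int) (seen : PySem.Set String)
    (slots : List (Option String)) (others dbgs : List String) :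
    List String → List (Option String) × List String × List String
  | [] => (slots, others, dbgs)
  | m :: rest =>
    if PySem.Set.contains seen m then
      pvBClassify priority seen slots others dbgs rest
    else
      let seen' := PySem.Set.add seen m
      if PySem.Dict.contains priority m then
        pvBClassify priority seen' (PySem.List.pySetD slots (PySem.Dict.getD priority m 0) m) others dbgs rest
      else if m ∈ pvDebugSet then
        pvBClassify priority seen' slots others (dbgs ++ [m]) rest
      else
        pvBClassify priority seen' slots (others ++ [m]) dbgs rest

def prioritize_lut_target_metrics_alt (metric_options : List String) (main_field_axis : String) (include_current_debug : Bool) : List String :=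
  let priority : PySem.Dict String Int :=
    ["achieved_" ++ main_field_axis ++ "_pp_mean",
     "achieved_bz_mT_pp_mean", "achieved_bmag_mT_pp_mean", "achieved_bproj_mT_pp_mean"].foldl
      (fun d m => if PySem.Dict.contains d m then d
                  else PySem.Dict.insert d m (d.items.length : Int))
      PySem.Dict.empty
  let res := pvBClassify priority PySem.Set.empty
    (List.replicate priority.items.length none) [] [] metric_options
  let ordered := res.1.filterMap id ++ res.2.1
  if include_current_debug || ordered.isEmpty then ordered ++ res.2.2 else ordered

-- ===== PRECONDITION & SPEC =====
def Spec_prioritize_lut_target_metrics (metric_options : List String) (main_field_axis : String) (include_current_debug : Bool) (out : List String) : Prop := out = prioritize_lut_target_metrics_alt metric_options main_field_axis include_current_debug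
instance (metric_options : List String) (main_field_axis : String) (include_current_debug : Bool) (out : List String) : Decidable (Spec_prioritize_lut_target_metrics metric_options main_field_axis include_current_debug out) := by unfold Spec_prioritize_lut_target_metrics; infer_instance

-- ===== CLAIM (what is proved, stated in full; the proofs are below) =====
def Claim_equal_prioritize_lut_target_metrics : Prop := ∀ (metric_options : List String) (main_field_axis : String) (include_current_debug : Bool), Dom_prioritize_lut_target_metrics metric_options main_field_axis include_current_debug → Spec_prioritize_lut_target_metrics metric_options main_field_axis include_current_debug (prioritize_lut_target_metrics metric_options main_field_axis include_current_debug)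

-- ===== LEMMAS AND PROOFS =====

-- canonical "first-occurrence scan": the sublist of the first occurrences in the
-- remaining list (second argument) of elements not yet seen that satisfy q
def pvScan (q : String → Prop) [DecidablePred q] : List String → List String → List String
  | _, [] => []
  | seen, m :: rest =>
    if m ∉ seen ∧ q m then m :: pvScan q (m :: seen) rest else pvScan q (m :: seen) rest

lemma pvScan_q {q : String → Prop} [DecidablePred q] :
    ∀ (opts seen : List String) (m : String), m ∈ pvScan q seen opts → q m := by
  intro opts
  induction opts with
  | nil => intro seen m h; simp [pvScan] at h
  | cons x rest ih =>
    intro seen m h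
    by_cases hc : x ∉ seen ∧ q x
    · rw [pvScan, if_pos hc] at h
      rcases List.mem_cons.1 h with rfl | h'
      · exact hc.2
      · exact ih _ _ h'
    · rw [pvScan, if_neg hc] at h
      exact ih _ _ h

lemma pvScan_mem {q : String → Prop} [DecidablePred q] :
    ∀ (opts seen : List String) (m : String), m ∈ opts → q m → m ∉ seen →
      m ∈ pvScan q seen opts := by
  intro opts
  induction opts with
  | nil => intro seen m h; simp at h
  | cons x rest ih =>
    intro seen m hm hq hs
    by_cases hc : x ∉ seen ∧ q x
    · rw [pvScan, if_pos hc]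
      rcases List.mem_cons.1 hm with rfl | h'
      · exact List.mem_cons_self
      · by_cases hxm : m = x
        · subst hxm; exact List.mem_cons_self
        · exact List.mem_cons_of_mem _ (ih (x :: seen) m h' hq (by
            intro h; rcases List.mem_cons.1 h with h | h
            · exact hxm h
            · exact hs h))
    · rw [pvScan, if_neg hc]
      rcases List.mem_cons.1 hm with rfl | h'
      · exact absurd ⟨hs, hq⟩ hc
      · by_cases hxm : m = x
        · subst hxm; exact absurd ⟨hs, hq⟩ hc
        · exact ih (x :: seen) m h' hq (by
            intro h; rcases List.mem_cons.1 h with h | h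
            · exact hxm h
            · exact hs h)

-- membership-congruence of the canonical scan in its seen list
lemma pvScan_congr {q : String → Prop} [DecidablePred q] :
    ∀ (opts seen1 seen2 : List String), (∀ m, m ∈ seen1 ↔ m ∈ seen2) →
      pvScan q seen1 opts = pvScan q seen2 opts := by
  intro opts
  induction opts with
  | nil => intro _ _ _; rfl
  | cons x rest ih =>
    intro seen1 seen2 h
    have hx : (x ∉ seen1 ∧ q x) ↔ (x ∉ seen2 ∧ q x) := by rw [h x]
    have h' : ∀ m, m ∈ x :: seen1 ↔ m ∈ x :: seen2 := by
      intro m; simp [List.mem_cons, h m]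
    by_cases hc : x ∉ seen1 ∧ q x
    · rw [pvScan, if_pos hc, pvScan, if_pos (hx.mp hc), ih _ _ h']
    · rw [pvScan, if_neg hc, pvScan, if_neg (fun h2 => hc (hx.mpr h2)), ih _ _ h']

-- congruence of the slot table in the processed condition
lemma pvSlots_congr (P : List String) (c1 c2 : String → Prop)
    [DecidablePred c1] [DecidablePred c2] (h : ∀ p ∈ P, c1 p ↔ c2 p) :
    P.map (fun p => if c1 p then some p else none)
      = P.map (fun p => if c2 p then some p else none) := by
  apply List.map_congr_left
  intro p hp
  by_cases h1 : c1 p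
  · rw [if_pos h1, if_pos ((h p hp).mp h1)]
  · rw [if_neg h1, if_neg (fun h2 => h1 ((h p hp).mpr h2))]

-- A's second pass ('extend' with the growing 'ordered') computed by the canonical scan
lemma pvFoldA2 (P dbg : List String) :
    ∀ (opts seen acc : List String),
      (∀ m ∈ opts, (m ∈ acc ↔ m ∈ P ∨ (m ∈ seen ∧ m ∉ dbg))) →
      opts.foldl (fun acc m => if m ∉ acc ∧ m ∉ dbg then acc ++ [m] else acc) acc
        = acc ++ pvScan (fun m => m ∉ P ∧ m ∉ dbg) seen opts := by
  intro opts
  induction opts with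
  | nil => intro seen acc h; simp [pvScan]
  | cons x rest ih =>
    intro seen acc h
    have hx := h x List.mem_cons_self
    by_cases hacc : x ∈ acc
    · rw [List.foldl_cons, if_neg (by simp [hacc])]
      have hsc : ¬ (x ∉ seen ∧ x ∉ P ∧ x ∉ dbg) := by
        rcases hx.mp hacc with hP | ⟨hs, _⟩
        · exact fun hh => hh.2.1 hP
        · exact fun hh => hh.1 hs
      rw [pvScan, if_neg hsc]
      refine ih (x :: seen) acc ?_
      intro m hm
      by_cases hmx : m = x
      · subst hmx
        constructor
        · intro _
          rcases hx.mp hacc with hP | ⟨_, hd⟩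
          · exact Or.inl hP
          · exact Or.inr ⟨List.mem_cons_self, hd⟩
        · intro _; exact hacc
      · rw [h m (List.mem_cons_of_mem _ hm)]
        simp [List.mem_cons, hmx]
    · by_cases hdbg : x ∈ dbg
      · rw [List.foldl_cons, if_neg (by simp [hdbg])]
        rw [pvScan, if_neg (by intro hh; exact hh.2.2 hdbg)]
        refine ih (x :: seen) acc ?_
        intro m hm
        by_cases hmx : m = x
        · subst hmx
          have hP : m ∉ P := fun hP => hacc (hx.mpr (Or.inl hP))
          simp [hacc, hP, hdbg]
        · rw [h m (List.mem_cons_of_mem _ hm)]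
          simp [List.mem_cons, hmx]
      · have hP : x ∉ P := fun hP => hacc (hx.mpr (Or.inl hP))
        have hs : x ∉ seen := fun hs => hacc (hx.mpr (Or.inr ⟨hs, hdbg⟩))
        rw [List.foldl_cons, if_pos ⟨hacc, hdbg⟩, pvScan, if_pos ⟨hs, hP, hdbg⟩]
        rw [ih (x :: seen) (acc ++ [x]) ?_]
        · simp
        · intro m hm
          by_cases hmx : m = x
          · subst hmx; simp [hdbg]
          · rw [List.mem_append]
            simp only [List.mem_singleton, hmx, or_false]
            rw [h m (List.mem_cons_of_mem _ hm)]
            simp [List.mem_cons, hmx]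

-- A's third pass (the debug fallback) computed by the canonical scan
lemma pvFoldA3 (P : List String) :
    ∀ (opts seen acc : List String),
      (∀ m ∈ opts, (m ∈ acc ↔ m ∈ P ∨ m ∉ pvDebugSet ∨ m ∈ seen)) →
      opts.foldl (fun acc m => if m ∈ pvDebugSet ∧ m ∉ acc then acc ++ [m] else acc) acc
        = acc ++ pvScan (fun m => m ∈ pvDebugSet ∧ m ∉ P) seen opts := by
  intro opts
  induction opts with
  | nil => intro seen acc h; simp [pvScan]
  | cons x rest ih =>
    intro seen acc h
    have hx := h x List.mem_cons_self
    by_cases hacc : x ∈ acc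
    · rw [List.foldl_cons, if_neg (by simp [hacc])]
      have hsc : ¬ (x ∉ seen ∧ x ∈ pvDebugSet ∧ x ∉ P) := by
        rcases hx.mp hacc with hP | hd | hs
        · exact fun hh => hh.2.2 hP
        · exact fun hh => hd hh.2.1
        · exact fun hh => hh.1 hs
      rw [pvScan, if_neg hsc]
      refine ih (x :: seen) acc ?_
      intro m hm
      by_cases hmx : m = x
      · subst hmx; simp [hacc]
      · rw [h m (List.mem_cons_of_mem _ hm)]
        simp [List.mem_cons, hmx]
    · have hrest : ¬ (x ∈ P ∨ x ∉ pvDebugSet ∨ x ∈ seen) := fun hh => hacc (hx.mpr hh)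
      push Not at hrest
      obtain ⟨hP, hd, hs⟩ := hrest
      rw [List.foldl_cons, if_pos ⟨hd, hacc⟩, pvScan, if_pos ⟨hs, hd, hP⟩]
      rw [ih (x :: seen) (acc ++ [x]) ?_]
      · simp
      · intro m hm
        by_cases hmx : m = x
        · subst hmx; simp
        · rw [List.mem_append]
          simp only [List.mem_singleton, hmx, or_false]
          rw [h m (List.mem_cons_of_mem _ hm)]
          simp [List.mem_cons, hmx]

-- B's classification loop computed by the canonical scans
lemma pvBClassify_spec (P : List String) (priority : PySem.Dict String Int)
    (hP : P.Nodup)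
    (hc : ∀ m, PySem.Dict.contains priority m = decide (m ∈ P))
    (hg : ∀ i (h : i < P.length), PySem.Dict.getD priority P[i] 0 = (i : Int)) :
    ∀ (opts processed : List String) (others dbgs : List String) (seen : PySem.Set String),
      (∀ m, PySem.Set.contains seen m = decide (m ∈ processed)) →
      pvBClassify priority seen (P.map fun p => if p ∈ processed then some p else none) others dbgs opts
        = (P.map (fun p => if p ∈ processed ∨ p ∈ opts then some p else none),
           others ++ pvScan (fun m => m ∉ P ∧ m ∉ pvDebugSet) processed opts,
           dbgs ++ pvScan (fun m => m ∈ pvDebugSet ∧ m ∉ P) processed opts) := by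
  intro opts
  induction opts with
  | nil =>
    intro processed others dbgs seen _
    simp [pvBClassify, pvScan]
  | cons x rest ih =>
    intro processed others dbgs seen hs
    have hmem : ∀ m (l : List String), PySem.Set.contains l m = decide (m ∈ l) := by
      intro m l
      by_cases hm : m ∈ l
      · simp [PySem.Set.contains, hm]
      · simp [PySem.Set.contains, hm]
    by_cases hseen : x ∈ processed
    · -- duplicate: skipped everywhere
      rw [pvBClassify, if_pos (by rw [hs x]; exact decide_eq_true hseen)]
      rw [ih processed others dbgs seen hs]
      refine congrArg₂ _ ?_ (congrArg₂ _ ?_ ?_)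
      · refine pvSlots_congr _ _ _ ?_
        intro p _
        constructor
        · rintro (h1 | h1)
          · exact Or.inl h1
          · exact Or.inr (List.mem_cons_of_mem _ h1)
        · rintro (h1 | h1)
          · exact Or.inl h1
          · rcases List.mem_cons.1 h1 with rfl | h1
            · exact Or.inl hseen
            · exact Or.inr h1
      · rw [pvScan, if_neg (fun hh => hh.1 hseen)]
        refine congrArg _ (pvScan_congr _ _ _ ?_)
        intro m; simp [List.mem_cons]
        intro h1; subst h1; exact hseen
      · rw [pvScan, if_neg (fun hh => hh.1 hseen)]
        refine congrArg _ (pvScan_congr _ _ _ ?_)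
        intro m; simp [List.mem_cons]
        intro h1; subst h1; exact hseen
    · rw [pvBClassify, if_neg (by rw [hs x]; simp [hseen])]
      have hs' : ∀ m, PySem.Set.contains (PySem.Set.add seen x) m = decide (m ∈ x :: processed) := by
        intro m
        rw [hmem]
        have : m ∈ PySem.Set.add seen x ↔ m ∈ x :: processed := by
          rw [PySem.Set.mem_add, List.mem_cons]
          have hm : m ∈ seen ↔ m ∈ processed := by
            have := hs m
            rw [hmem] at this
            constructor
            · intro h1; exact of_decide_eq_true (this ▸ decide_eq_true h1)
            · intro h1
              by_contra h2
              have := (decide_eq_false h2).symm.trans (this.trans (decide_eq_true h1))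
              simp at this
          rw [hm]; tauto
        exact decide_eq_decide.mpr this
      by_cases hcP : x ∈ P
      · -- preferred: fills its slot
        rw [if_pos (by rw [hc x]; exact decide_eq_true hcP)]
        obtain ⟨i, hi, hPi⟩ := List.mem_iff_getElem.mp hcP
        have hgd : PySem.Dict.getD priority x 0 = (i : Int) := by rw [← hPi]; exact hg i hi
        have hset :
            PySem.List.pySetD ((P.map fun p => if p ∈ processed then some p else none)) (PySem.Dict.getD priority x 0) x
              = P.map fun p => if p ∈ x :: processed then some p else none := by
          rw [hgd, PySem.List.pySetD_natCast]
          apply List.ext_getElem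
          · simp
          · intro j hj hj2
            rw [List.getElem_set]
            by_cases hij : i = j
            · subst hij
              simp [hPi]
            · have hjP : j < P.length := by simpa using hj2
              rw [if_neg hij]
              simp only [List.getElem_map]
              have hne : P[j] ≠ x := by
                rw [← hPi]
                intro hh
                exact hij ((List.Nodup.getElem_inj_iff hP).mp hh).symm
              simp [List.mem_cons, hne]
        rw [hset, ih (x :: processed) others dbgs _ hs']
        refine congrArg₂ _ ?_ (congrArg₂ _ ?_ ?_)
        · refine pvSlots_congr _ _ _ ?_
          intro p _
          simp only [List.mem_cons]
          tauto
        · rw [pvScan, if_neg (fun hh => hh.2.1 hcP)]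
        · rw [pvScan, if_neg (fun hh => hh.2.2 hcP)]
      · have hcP' : PySem.Dict.contains priority x = false := by rw [hc x]; simp [hcP]
        rw [if_neg (by simp [hcP'])]
        by_cases hdbg : x ∈ pvDebugSet
        · rw [if_pos hdbg]
          have hslots :
              (P.map fun p => if p ∈ processed then some p else none)
                = P.map fun p => if p ∈ x :: processed then some p else none := by
            refine pvSlots_congr _ _ _ ?_
            intro p hp
            have hne : p ≠ x := fun hh => hcP (hh ▸ hp)
            rw [List.mem_cons]; simp [hne]
          rw [hslots, ih (x :: processed) others (dbgs ++ [x]) _ hs']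
          refine congrArg₂ _ ?_ (congrArg₂ _ ?_ ?_)
          · refine pvSlots_congr _ _ _ ?_
            intro p _
            simp only [List.mem_cons]
            tauto
          · rw [pvScan, if_neg (fun hh => hh.2.2 hdbg)]
          · rw [pvScan, if_pos ⟨hseen, hdbg, hcP⟩]
            simp
        · rw [if_neg hdbg]
          have hslots :
              (P.map fun p => if p ∈ processed then some p else none)
                = P.map fun p => if p ∈ x :: processed then some p else none := by
            refine pvSlots_congr _ _ _ ?_
            intro p hp
            have hne : p ≠ x := fun hh => hcP (hh ▸ hp)
            rw [List.mem_cons]; simp [hne]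
          rw [hslots, ih (x :: processed) (others ++ [x]) dbgs _ hs']
          refine congrArg₂ _ ?_ (congrArg₂ _ ?_ ?_)
          · refine pvSlots_congr _ _ _ ?_
            intro p _
            simp only [List.mem_cons]
            tauto
          · rw [pvScan, if_pos ⟨hseen, hcP, hdbg⟩]
            simp
          · rw [pvScan, if_neg (fun hh => hdbg hh.2.1)]

lemma pvFilterMap_slots (P opts : List String) :
    (P.map fun p => if p ∈ opts then some p else none).filterMap id
      = P.filter (fun p => decide (p ∈ opts)) := by
  rw [List.filterMap_map]
  induction P with
  | nil => rfl
  | cons x rest ih =>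
    simp only [Function.comp, id] at ih
    by_cases hx : x ∈ opts <;> simp [hx, ih]

-- abbreviations for the concrete preferred-order analysis
def pvPref (a : String) : List String :=
  [a, "achieved_bz_mT_pp_mean", "achieved_bmag_mT_pp_mean", "achieved_bproj_mT_pp_mean"]

def pvPriorityOf (a : String) : PySem.Dict String Int :=
  (pvPref a).foldl
    (fun d m => if PySem.Dict.contains d m then d
                else PySem.Dict.insert d m (d.items.length : Int))
    PySem.Dict.empty

-- the priority table is the enumeration of the deduplicated preferred order
lemma pvFacts (a : String) :
    (PySem.List.dedup (pvPref a)).Nodup ∧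
    (∀ m, PySem.Dict.contains (pvPriorityOf a) m = decide (m ∈ PySem.List.dedup (pvPref a))) ∧
    (∀ i (h : i < (PySem.List.dedup (pvPref a)).length),
        PySem.Dict.getD (pvPriorityOf a) (PySem.List.dedup (pvPref a))[i] 0 = (i : Int)) ∧
    (pvPriorityOf a).items.length = (PySem.List.dedup (pvPref a)).length := by
  have key : ∀ m, (pvPriorityOf a).keys = PySem.List.dedup (pvPref a) →
      PySem.Dict.contains (pvPriorityOf a) m = decide (m ∈ PySem.List.dedup (pvPref a)) := by
    intro m hk
    rw [PySem.Dict.contains_eq_decide_mem_keys, hk]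
  by_cases h1 : a = "achieved_bz_mT_pp_mean"
  · subst h1
    exact ⟨by decide, fun m => key m (by decide),
      by intro i h
         rw [show (PySem.List.dedup (pvPref "achieved_bz_mT_pp_mean")).length = 3 from rfl] at h
         interval_cases i <;> rfl,
      by rfl⟩
  by_cases h2 : a = "achieved_bmag_mT_pp_mean"
  · subst h2
    exact ⟨by decide, fun m => key m (by decide),
      by intro i h
         rw [show (PySem.List.dedup (pvPref "achieved_bmag_mT_pp_mean")).length = 3 from rfl] at h
         interval_cases i <;> rfl,
      by rfl⟩
  by_cases h3 : a = "achieved_bproj_mT_pp_mean"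
  · subst h3
    exact ⟨by decide, fun m => key m (by decide),
      by intro i h
         rw [show (PySem.List.dedup (pvPref "achieved_bproj_mT_pp_mean")).length = 3 from rfl] at h
         interval_cases i <;> rfl,
      by rfl⟩
  -- a distinct from the three fixed metrics
  have hnd : (pvPref a).Nodup := by
    simp [pvPref, List.nodup_cons, h1, h2, h3]
  have hdd : PySem.List.dedup (pvPref a) = pvPref a := by
    rw [PySem.List.dedup_eq_ofList]
    exact PySem.Set.ofList_eq_self_of_nodup _ hnd
  have hpr : pvPriorityOf a =
      ⟨[(a, 0), ("achieved_bz_mT_pp_mean", 1), ("achieved_bmag_mT_pp_mean", 2),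
        ("achieved_bproj_mT_pp_mean", 3)]⟩ := by
    unfold pvPriorityOf pvPref
    simp [PySem.Dict.contains, PySem.Dict.insert, PySem.Dict.empty, h1, h2, h3]
  refine ⟨by rw [hdd]; exact hnd, fun m => key m ?_, ?_, ?_⟩
  · rw [hpr, hdd]
    rfl
  · intro i h
    simp only [hdd] at h ⊢
    rw [show (pvPref a).length = 4 from rfl] at h
    interval_cases i <;>
      simp [hpr, pvPref, PySem.Dict.getD, PySem.Dict.get?, h1, h2, h3]
  · rw [hpr, hdd]
    rfl

-- ===== VERDICT (by name: the statement is the Claim_ definition above) =====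
theorem prioritize_lut_target_metrics_spec : Claim_equal_prioritize_lut_target_metrics := by
  intro opts axis inc _
  unfold Spec_prioritize_lut_target_metrics
  simp only [prioritize_lut_target_metrics, prioritize_lut_target_metrics_alt]
  rw [show ["achieved_" ++ axis ++ "_pp_mean", "achieved_bz_mT_pp_mean",
            "achieved_bmag_mT_pp_mean", "achieved_bproj_mT_pp_mean"]
        = pvPref ("achieved_" ++ axis ++ "_pp_mean") from rfl]
  obtain ⟨hP, hc, hg, hlen⟩ := pvFacts ("achieved_" ++ axis ++ "_pp_mean")
  set a := "achieved_" ++ axis ++ "_pp_mean" with ha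
  set P := PySem.List.dedup (pvPref a) with hPdef
  rw [show (pvPref a).foldl
        (fun d m => if PySem.Dict.contains d m then d
                    else PySem.Dict.insert d m (d.items.length : Int)) PySem.Dict.empty
      = pvPriorityOf a from rfl]
  -- the A-side folds
  have hpass1 : ∀ m ∈ opts,
      (m ∈ P.filter (fun m => decide (m ∈ opts)) ↔ m ∈ P ∨ (m ∈ ([] : List String) ∧ m ∉ pvDebugSet)) := by
    intro m hm
    simp [List.mem_filter, hm]
  rw [pvFoldA2 P pvDebugSet opts [] _ hpass1]
  have hcore : ∀ m ∈ opts,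
      (m ∈ P.filter (fun m => decide (m ∈ opts)) ++ pvScan (fun m => m ∉ P ∧ m ∉ pvDebugSet) [] opts
        ↔ m ∈ P ∨ m ∉ pvDebugSet ∨ m ∈ ([] : List String)) := by
    intro m hm
    simp only [List.mem_append, List.mem_filter, List.not_mem_nil, or_false]
    constructor
    · rintro (h | h)
      · exact Or.inl h.1
      · exact Or.inr (pvScan_q _ _ _ h).2
    · rintro (h | h)
      · exact Or.inl ⟨h, by simp [hm]⟩
      · by_cases hmP : m ∈ P
        · exact Or.inl ⟨hmP, by simp [hm]⟩
        · exact Or.inr (pvScan_mem opts [] m hm ⟨hmP, h⟩ (by simp))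
  rw [pvFoldA3 P opts [] _ hcore]
  -- the B-side classification
  have hrep : List.replicate (pvPriorityOf a).items.length (none : Option String)
      = P.map (fun p => if p ∈ ([] : List String) then some p else none) := by
    rw [hlen, show (fun p : String => if p ∈ ([] : List String) then some p else none)
          = (fun _ => (none : Option String)) from by funext p; simp]
    exact List.map_const'.symm
  have hseen0 : ∀ m, PySem.Set.contains (PySem.Set.empty : PySem.Set String) m
      = decide (m ∈ ([] : List String)) := by
    intro m; simp [PySem.Set.contains, PySem.Set.empty]
  rw [hrep, pvBClassify_spec P (pvPriorityOf a) hP hc hg opts [] [] [] PySem.Set.empty hseen0]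
  simp only [List.nil_append]
  rw [pvSlots_congr P _ (fun p => p ∈ opts) (by intro p _; simp), pvFilterMap_slots]
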